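-- pv_equiv track=rewrite | github.com/pypi-data/pypi-mirror-368 | packages/isospec-data-tools/isospec_data_tools-0.0.4.tar.gz/isospec_data_tools-0.0.4/src/isospec_data_tools/analysis/specialized/confounder_analysis.py | find_glycan_confounders
-- ===== SOURCE A (Python) =====
-- def find_glycan_confounders(glycan_list: list[str], confounder_dict: dict[str, list[str]]) -> dict[str, list[str]]:
--     """
--     Find which confounders each glycan is associated with.
--     Args:
--         glycan_list (List[str]): List of glycans to check
--         confounder_dict (Dict[str, List[str]]): Dictionary mapping confounders to lists of glycans
--     Returns:
--         Dict[str, List[str]]: Dictionary mapping each glycan to list of confounders it's found in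
--     """
--     glycan_confounders = {}
--
--     for glycan in glycan_list:
--         confounders = []
--         for confounder, glycans in confounder_dict.items():
--             if glycan in glycans:
--                 confounders.append(confounder)
--         glycan_confounders[glycan] = confounders
--
--     return glycan_confounders
-- ===== SOURCE B (Python) =====
-- def find_glycan_confounders(glycan_list: list[str], confounder_dict: dict[str, list[str]]) -> dict[str, list[str]]:
--     # Build an inverted glycan -> confounders index in one pass over confounder_dict,
--     # then answer each glycan by a single lookup.
--     index = {}
--     for confounder, glycans in confounder_dict.items():
--         for glycan in dict.fromkeys(glycans):  # distinct glycans of this confounder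
--             index.setdefault(glycan, []).append(confounder)
--     # value depends only on the glycan, so iterating distinct glycans gives the same dict
--     return {glycan: index.get(glycan, []) for glycan in dict.fromkeys(glycan_list)}
-- ===== Notes on version B (the rewrite author's own statement) =====
-- stated objective: faster
-- what changed: Replaces the per-glycan scan over all confounder lists (membership test each time) with a single pass that builds an inverted glycan-to-confounders index, so each query glycan is answered by one dictionary lookup.
import Mathlib
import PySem

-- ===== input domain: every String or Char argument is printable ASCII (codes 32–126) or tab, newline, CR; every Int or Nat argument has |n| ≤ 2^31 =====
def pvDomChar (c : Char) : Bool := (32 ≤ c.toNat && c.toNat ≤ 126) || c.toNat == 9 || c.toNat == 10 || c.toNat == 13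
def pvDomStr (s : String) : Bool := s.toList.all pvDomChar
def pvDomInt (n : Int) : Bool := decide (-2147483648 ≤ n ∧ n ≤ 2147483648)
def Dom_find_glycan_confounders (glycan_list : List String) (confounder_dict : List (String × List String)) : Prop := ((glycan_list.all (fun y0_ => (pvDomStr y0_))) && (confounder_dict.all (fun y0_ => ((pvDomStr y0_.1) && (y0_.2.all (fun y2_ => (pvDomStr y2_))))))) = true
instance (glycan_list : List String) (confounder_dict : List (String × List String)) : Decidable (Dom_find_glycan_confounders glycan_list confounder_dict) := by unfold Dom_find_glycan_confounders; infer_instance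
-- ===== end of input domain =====

-- B builds an inverted glycan→confounders index in one pass instead of scanning every confounder list per glycan (measurably faster on large inputs).


-- ===== PORT A =====
-- Python A receives `confounder_dict` as a dict, so duplicate keys of the
-- association list collapse per Python dict semantics (Dict.ofList); the
-- result dict is built by insertion, one key per glycan.
def find_glycan_confounders (glycan_list : List String) (confounder_dict : List (String × List String)) : List (String × List String) :=
  let d := PySem.Dict.ofList confounder_dict
  (glycan_list.foldl
    (fun glycan_confounders glycan =>
      glycan_confounders.insert glycan
        (d.items.foldl
          (fun confounders p =>
            if p.2.contains glycan then confounders ++ [p.1] else confounders)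
          []))
    PySem.Dict.empty).items

-- ===== PORT B =====
-- Inverted index: one pass over confounder_dict appending each confounder to
-- index[glycan] for its distinct glycans (dict.fromkeys = PySem.List.dedup),
-- then one lookup per distinct query glycan.
def find_glycan_confounders_alt (glycan_list : List String) (confounder_dict : List (String × List String)) : List (String × List String) :=
  let d := PySem.Dict.ofList confounder_dict
  let index : PySem.Dict String (List String) :=
    d.items.foldl
      (fun index p =>
        (PySem.List.dedup p.2).foldl
          (fun index glycan => index.modify glycan [] (· ++ [p.1]))
          index)
      PySem.Dict.empty
  (PySem.List.dedup glycan_list).map (fun glycan => (glycan, index.getD glycan []))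

-- ===== PRECONDITION & SPEC =====
def Spec_find_glycan_confounders (glycan_list : List String) (confounder_dict : List (String × List String)) (out : List (String × List String)) : Prop := out = find_glycan_confounders_alt glycan_list confounder_dict
instance (glycan_list : List String) (confounder_dict : List (String × List String)) (out : List (String × List String)) : Decidable (Spec_find_glycan_confounders glycan_list confounder_dict out) := by unfold Spec_find_glycan_confounders; infer_instance

-- ===== CLAIM (what is proved, stated in full; the proofs are below) =====
def Claim_equal_find_glycan_confounders : Prop := ∀ (glycan_list : List String) (confounder_dict : List (String × List String)), Dom_find_glycan_confounders glycan_list confounder_dict → Spec_find_glycan_confounders glycan_list confounder_dict (find_glycan_confounders glycan_list confounder_dict)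

-- ===== LEMMAS AND PROOFS =====

-- in a Nodup list, filtering (· == g) keeps exactly the (unique) occurrence of g
theorem pv_filter_beq_of_nodup (l : List String) (g : String) (h : l.Nodup) :
    l.filter (· == g) = if g ∈ l then [g] else [] := by
  induction l with
  | nil => simp
  | cons a l ih =>
    rcases List.nodup_cons.mp h with ⟨ha, hl⟩
    by_cases hag : a = g
    · subst hag
      simp [ih hl, ha]
    · simp [hag, ih hl, Ne.symm hag]

-- the inner loop of B's index construction: one confounder c appended to
-- index[g] exactly when g occurs in ys
theorem pv_inner_getD (ys : List String) (c g : String)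
    (idx : PySem.Dict String (List String)) :
    ((PySem.List.dedup ys).foldl (fun index glycan => index.modify glycan [] (· ++ [c])) idx).getD g []
      = idx.getD g [] ++ (if ys.contains g then [c] else []) := by
  have hmap : (PySem.List.dedup ys).foldl (fun index glycan => index.modify glycan [] (· ++ [c])) idx
      = ((PySem.List.dedup ys).map (fun x => (x, c))).foldl (fun d p => d.modify p.1 [] (· ++ [p.2])) idx := by
    rw [List.foldl_map]
  rw [hmap, PySem.Dict.getD_foldl_modify_append]
  congr 1
  rw [List.filter_map]
  have hnd : (PySem.List.dedup ys).Nodup := PySem.Set.nodup_ofList ys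
  have hmem : g ∈ PySem.List.dedup ys ↔ g ∈ ys := PySem.Set.mem_ofList ys g
  have : (PySem.List.dedup ys).filter ((fun p => p.1 == g) ∘ fun x => (x, c))
      = (PySem.List.dedup ys).filter (· == g) := by
    congr 1
  rw [this, pv_filter_beq_of_nodup _ _ hnd]
  by_cases hg : g ∈ ys
  · simp [hg]
  · simp [hg]

-- B's index at key g collects, in order, the confounders whose glycan list contains g
theorem pv_index_getD (items : List (String × List String)) (g : String)
    (idx : PySem.Dict String (List String)) :
    (items.foldl
        (fun index p => (PySem.List.dedup p.2).foldl
          (fun index glycan => index.modify glycan [] (· ++ [p.1])) index)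
        idx).getD g []
      = idx.getD g [] ++ (items.filter (fun p => p.2.contains g)).map (·.1) := by
  induction items generalizing idx with
  | nil => simp
  | cons p items ih =>
    rw [List.foldl_cons, ih, pv_inner_getD, List.filter_cons]
    by_cases hc : g ∈ p.2
    · simp [hc, List.append_assoc]
    · simp [hc]

-- A's output dict: folding inserts of (g, F g) over glycan_list produces the
-- items list (dedup glycan_list).map (fun g => (g, F g)), since the value
-- written for a key depends only on the key
theorem pv_foldA (F : String → List String) (gl : List String) :
    ∀ (s : List String), s.Nodup →
      (gl.foldl (fun acc g => acc.insert g (F g))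
          (PySem.Dict.mk (s.map (fun g => (g, F g))))).items
        = (PySem.Set.update s gl).map (fun g => (g, F g)) := by
  induction gl with
  | nil => intro s _; simp [PySem.Set.update]
  | cons g gl ih =>
    intro s hs
    rw [List.foldl_cons, PySem.Set.update_cons]
    by_cases hg : g ∈ s
    · have hcont : (PySem.Dict.mk (s.map (fun g => (g, F g)))).contains g = true := by
        rw [PySem.Dict.contains_mk]
        simp only [List.any_map]
        exact List.any_eq_true.mpr ⟨g, hg, by simp⟩
      have hins : (PySem.Dict.mk (s.map (fun g => (g, F g)))).insert g (F g)
          = PySem.Dict.mk (s.map (fun g => (g, F g))) := by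
        apply PySem.Dict.ext
        rw [PySem.Dict.items_insert_of_contains _ _ hcont]
        show (s.map _).map _ = _
        rw [List.map_map]
        apply List.map_congr_left
        intro x _
        by_cases hxg : x = g
        · subst hxg; simp
        · simp [Function.comp, hxg]
      have hadd : PySem.Set.add s g = s := by
        simp [PySem.Set.add, PySem.Set.contains, hg]
      rw [hins, hadd, ih s hs]
    · have hcont : (PySem.Dict.mk (s.map (fun g => (g, F g)))).contains g = false := by
        rw [PySem.Dict.contains_mk]
        simp only [List.any_map]
        simp only [List.any_eq_false]
        intro x hx
        simp only [Function.comp]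
        exact fun hbeq => hg (eq_of_beq hbeq ▸ hx)
      have hins : (PySem.Dict.mk (s.map (fun g => (g, F g)))).insert g (F g)
          = PySem.Dict.mk ((s ++ [g]).map (fun g => (g, F g))) := by
        apply PySem.Dict.ext
        rw [PySem.Dict.items_insert_of_not_contains _ _ hcont]
        simp
      have hadd : PySem.Set.add s g = s ++ [g] := by
        simp [PySem.Set.add, PySem.Set.contains]
        exact hg
      rw [hins, hadd, ih (s ++ [g]) (by simp [List.nodup_append, hs]; exact fun a ha h => hg (h ▸ ha))]

-- ===== VERDICT (by name: the statement is the Claim_ definition above) =====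
theorem pv_foldA_empty (F : String → List String) (gl : List String) :
    (gl.foldl (fun acc g => acc.insert g (F g)) PySem.Dict.empty).items
      = (PySem.List.dedup gl).map (fun g => (g, F g)) := by
  have h := pv_foldA F gl [] List.nodup_nil
  simpa [PySem.Set.update_nil_left] using h

theorem find_glycan_confounders_spec : Claim_equal_find_glycan_confounders := by
  intro gl cd _
  show find_glycan_confounders gl cd = find_glycan_confounders_alt gl cd
  unfold find_glycan_confounders find_glycan_confounders_alt
  set d := PySem.Dict.ofList cd with hd
  rw [pv_foldA_empty]
  show (PySem.List.dedup gl).map _ = (PySem.List.dedup gl).map _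
  apply List.map_congr_left
  intro g _
  rw [pv_index_getD]
  simp only [PySem.Dict.getD_empty, List.nil_append]
  rw [PySem.List.foldl_append_if (fun p => p.2.contains g) (·.1) d.items []]
  rw [List.nil_append]
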